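-- pv_equiv track=rewrite | github.com/RevinderDev/code-wars | python/6kyu/duplicates.py | duplicate_count
-- ===== SOURCE A (Python) =====
-- import collections
--
-- def duplicate_count(text):
--     # Your code goes here
--
--     char_dict = collections.defaultdict(int)
--     for char in text.lower():
--         char_dict[char] += 1
--
--     counter = 0
--     for value in char_dict.values():
--         if value > 1:
--             counter += 1
--
--     return counter
-- ===== SOURCE B (Python) =====
-- def duplicate_count(text):
--     def go(chars):
--         if not chars:
--             return 0
--         head = chars[0]
--         rest = [c for c in chars[1:] if c != head]
--         return (1 if len(chars) - 1 > len(rest) else 0) + go(rest)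
--     return go(list(text.lower()))
-- ===== Notes on version B (the rewrite author's own statement) =====
-- stated objective: alternative
-- what changed: Replaces the defaultdict frequency table plus a second pass over its values by a partition recursion: peel the first character, filter out all its copies, add 1 when any copy was removed, and recurse on the remainder.
import Mathlib
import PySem

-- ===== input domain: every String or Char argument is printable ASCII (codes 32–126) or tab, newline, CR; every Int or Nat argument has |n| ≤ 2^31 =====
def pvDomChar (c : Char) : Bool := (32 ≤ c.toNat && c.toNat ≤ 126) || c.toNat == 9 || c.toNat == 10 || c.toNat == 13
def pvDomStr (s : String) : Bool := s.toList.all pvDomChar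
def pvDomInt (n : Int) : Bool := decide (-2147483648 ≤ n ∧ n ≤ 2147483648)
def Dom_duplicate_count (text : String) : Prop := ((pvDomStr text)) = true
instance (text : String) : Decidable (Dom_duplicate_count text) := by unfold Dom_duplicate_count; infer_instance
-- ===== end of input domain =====

-- B replaces A's frequency dict + second pass over its values by a peel-and-filter recursion (alternative decomposition, same results).

-- ===== PORT A =====
def duplicate_count (text : String) : Int :=
  -- char_dict = defaultdict(int); for char in text.lower(): char_dict[char] += 1
  let char_dict : PySem.Dict Char Int :=
    (PySem.Str.lower text).toList.foldl (fun d c => d.insert c (d.getD c 0 + 1)) PySem.Dict.empty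
  -- counter = 0; for value in char_dict.values(): if value > 1: counter += 1
  char_dict.values.foldl (fun counter v => if v > 1 then counter + 1 else counter) 0

-- ===== PORT B =====
-- go(chars): peel the first char, drop all its other copies, +1 if any copy was dropped, recurse
def pvGo : List Char → Int
  | [] => 0
  | h :: t =>
    let rest := t.filter (fun c => decide (c ≠ h))
    (if t.length > rest.length then 1 else 0) + pvGo rest
termination_by l => l.length
decreasing_by
  calc (List.filter (fun x => decide (x.1 ≠ h)) t.attach).unattach.length
      ≤ t.attach.unattach.length := by
        simp only [List.unattach, List.length_map]
        exact List.length_filter_le _ _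
    _ < (h :: t).length := by simp

def duplicate_count_alt (text : String) : Int :=
  pvGo (PySem.Str.lower text).toList

-- ===== PRECONDITION & SPEC =====
def Spec_duplicate_count (text : String) (out : Int) : Prop := out = duplicate_count_alt text
instance (text : String) (out : Int) : Decidable (Spec_duplicate_count text out) := by unfold Spec_duplicate_count; infer_instance

-- ===== CLAIM (what is proved, stated in full; the proofs are below) =====
def Claim_equal_duplicate_count : Prop := ∀ (text : String), Dom_duplicate_count text → Spec_duplicate_count text (duplicate_count text)

-- ===== LEMMAS AND PROOFS =====

-- the common value: the number of distinct characters of l occurring more than once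
def pvDups (l : List Char) : Nat := (l.toFinset.filter (fun c => 1 < l.count c)).card

lemma pvDups_cons (h : Char) (t : List Char) :
    pvDups (h :: t) = (if 0 < t.count h then 1 else 0) + pvDups (t.filter (fun c => decide (c ≠ h))) := by
  set rest := t.filter (fun c => decide (c ≠ h)) with hrest
  have hfin : rest.toFinset = t.toFinset.erase h := by
    ext c
    simp [hrest, Finset.mem_erase, and_comm]
  have hcount : ∀ c : Char, c ≠ h → (h :: t).count c = rest.count c := by
    intro c hc
    rw [List.count_cons]
    have : rest.count c = t.count c := List.count_filter (by simp [hc])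
    simp [this, Ne.symm hc]
  unfold pvDups
  have hins : (h :: t).toFinset = insert h (t.toFinset.erase h) := by
    ext c
    by_cases hc : c = h <;> simp [hc]
  rw [hins, Finset.filter_insert]
  have hno : h ∉ Finset.filter (fun c => 1 < (h :: t).count c) (t.toFinset.erase h) := by
    simp
  have hfe : Finset.filter (fun c => 1 < (h :: t).count c) (t.toFinset.erase h)
      = Finset.filter (fun c => 1 < rest.count c) rest.toFinset := by
    rw [hfin]
    apply Finset.filter_congr
    intro c hc
    have hcne : c ≠ h := (Finset.mem_erase.mp hc).1
    simp [hcount c hcne]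
  have hph : (1 < (h :: t).count h) ↔ 0 < t.count h := by
    rw [List.count_cons]
    simp
  split_ifs with h1 h2 h3
  · rw [hfe, Finset.card_insert_of_notMem (by rw [hfe] at hno; exact hno)]
    omega
  · exact absurd (hph.mp h1) h2
  · exact absurd (hph.mpr h3) h1
  · rw [hfe]
    omega

lemma pvLen_iff (h : Char) (t : List Char) :
    t.length > (t.filter (fun c => decide (c ≠ h))).length ↔ 0 < t.count h := by
  have hsplit : (t.filter (fun c => c == h)).length + (t.filter (fun c => !(c == h))).length
      = t.length := Eq.symm (List.length_eq_length_filter_add _)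
  have hne : (t.filter (fun c => !(c == h))) = t.filter (fun c => decide (c ≠ h)) := by
    apply List.filter_congr
    intro c _
    cases hch : c == h <;> simp_all
  have hcnt : t.count h = (t.filter (fun c => c == h)).length := by
    rw [List.count, List.countP_eq_length_filter]
  rw [hne] at hsplit
  omega

lemma pvGo_eq_aux : ∀ (n : Nat) (l : List Char), l.length ≤ n → pvGo l = (pvDups l : Int) := by
  intro n
  induction n with
  | zero =>
    intro l hl
    have : l = [] := List.eq_nil_of_length_eq_zero (Nat.le_zero.mp hl)
    subst this
    simp [pvGo, pvDups]
  | succ n ih =>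
    intro l hl
    cases l with
    | nil => simp [pvGo, pvDups]
    | cons h t =>
      rw [pvGo, pvDups_cons]
      have hrl : (t.filter (fun c => decide (c ≠ h))).length ≤ n :=
        le_trans (List.length_filter_le _ _) (by simp at hl; omega)
      rw [ih _ hrl]
      simp only [pvLen_iff]
      push_cast
      ring

lemma pvGo_eq (l : List Char) : pvGo l = (pvDups l : Int) :=
  pvGo_eq_aux l.length l (Nat.le_refl _)

lemma countP_ofList_eq (l : List Char) :
    (PySem.Set.ofList l).countP (fun c => decide (1 < l.count c)) = pvDups l := by
  have hnd := PySem.Set.nodup_ofList l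
  have hm : ∀ y, y ∈ PySem.Set.ofList l ↔ y ∈ l := PySem.Set.mem_ofList l
  unfold pvDups
  rw [List.countP_eq_length_filter]
  rw [← List.toFinset_card_of_nodup (List.Nodup.filter _ hnd)]
  congr 1
  rw [List.toFinset_filter]
  ext c
  simp [hm c]

lemma dup_eq (text : String) :
    duplicate_count text = (pvDups (PySem.Str.lower text).toList : Int) := by
  unfold duplicate_count
  set cs := (PySem.Str.lower text).toList with hcs
  show (PySem.Dict.values _).foldl _ 0 = _
  rw [PySem.Dict.foldl_insert_getD_add_one_eq_counter]
  have hv : (PySem.Dict.counter cs).values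
      = (PySem.Set.ofList cs).map (fun k => ((cs.count k : Int))) := by
    show (PySem.Dict.counter cs).items.map Prod.snd = _
    rw [PySem.Dict.items_counter]
    simp [List.map_map, Function.comp]
  rw [hv]
  have := PySem.List.foldl_count_if (fun v : Int => decide (v > 1))
    ((PySem.Set.ofList cs).map (fun k => ((cs.count k : Int)))) 0
  simp only [decide_eq_true_eq] at this
  rw [this, List.countP_map]
  rw [← countP_ofList_eq cs]
  rw [zero_add]
  have hP : List.countP ((fun v : Int => decide (v > 1)) ∘ fun k => ((cs.count k : Int)))
      (PySem.Set.ofList cs) = List.countP (fun c => decide (1 < cs.count c)) (PySem.Set.ofList cs) := by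
    apply List.countP_congr
    intro c _
    simp [Function.comp, Nat.one_lt_cast]
  rw [hP]

-- ===== VERDICT (by name: the statement is the Claim_ definition above) =====
theorem duplicate_count_spec : Claim_equal_duplicate_count := by
  intro text _
  show duplicate_count text = duplicate_count_alt text
  rw [dup_eq, duplicate_count_alt, pvGo_eq]
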